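-- pv_equiv track=rewrite | github.com/etvan13/Spacetime-Memory-Lattice | coordinate.py | coord_conv
-- ===== SOURCE A (Python) =====
-- def coord_conv(number):
--     number %= 60 ** 6
--     digits = []
--     while number:
--         digits.append(number % 60)
--         number //= 60
--     while len(digits) < 6:                  # ← pad to 6
--         digits.append(0)
--     return digits
-- ===== SOURCE B (Python) =====
-- def coord_conv(number):
--     number %= 60 ** 6
--     return [(number // 60 ** i) % 60 for i in range(6)]
-- ===== Notes on version B (the rewrite author's own statement) =====
-- stated objective: simpler
-- what changed: Replaces the extract-and-divide while loop with a running quotient plus a separate padding loop by a direct fixed-length construction: each of the 6 base-60 digits is computed independently as (number // 60**i) % 60.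
import Mathlib
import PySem

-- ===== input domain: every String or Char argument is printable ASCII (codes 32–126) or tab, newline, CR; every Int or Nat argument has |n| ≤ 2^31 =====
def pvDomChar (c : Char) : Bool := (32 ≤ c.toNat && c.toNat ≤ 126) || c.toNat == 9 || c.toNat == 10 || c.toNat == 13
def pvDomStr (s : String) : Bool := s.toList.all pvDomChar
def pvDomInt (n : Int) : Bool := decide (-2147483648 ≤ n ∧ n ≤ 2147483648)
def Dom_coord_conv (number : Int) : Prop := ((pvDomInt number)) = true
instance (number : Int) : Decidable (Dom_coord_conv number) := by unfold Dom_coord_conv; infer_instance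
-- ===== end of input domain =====

-- B replaces A's extract-and-divide loop plus padding loop by six independent digit formulas (objective: simpler).

-- ===== PORT A =====
-- A's `while number:` loop; `number` is always ≥ 0 here (it starts as `number % 60**6`),
-- so the guard `0 < n` coincides with Python's `number != 0` on every reachable state.
def coordLoopA (n : Int) (digits : List Int) : List Int :=
  if h : 0 < n then
    coordLoopA (PySem.Int.floordiv n 60) (digits ++ [PySem.Int.mod n 60])
  else digits
termination_by n.toNat
decreasing_by
  have h60 : PySem.Int.floordiv n 60 = n / 60 := PySem.Int.floordiv_eq_ediv_of_pos (by norm_num)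
  have h1 : n / 60 < n := by
    rw [Int.ediv_lt_iff_lt_mul (by norm_num)]; nlinarith
  have h2 : (0:Int) ≤ n / 60 := Int.ediv_nonneg (le_of_lt h) (by norm_num)
  rw [h60]; omega

-- A's `while len(digits) < 6:` padding loop
def coordPadA (digits : List Int) : List Int :=
  if digits.length < 6 then coordPadA (digits ++ [0]) else digits
termination_by 6 - digits.length
decreasing_by simp; omega

def coord_conv (number : Int) : List Int :=
  coordPadA (coordLoopA (PySem.Int.mod number (60 ^ 6)) [])

-- ===== PORT B =====
def coord_conv_alt (number : Int) : List Int :=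
  let m := PySem.Int.mod number (60 ^ 6)
  (List.range 6).map (fun i => PySem.Int.mod (PySem.Int.floordiv m (60 ^ i)) 60)

-- ===== PRECONDITION & SPEC =====
def Spec_coord_conv (number : Int) (out : List Int) : Prop := out = coord_conv_alt number
instance (number : Int) (out : List Int) : Decidable (Spec_coord_conv number out) := by unfold Spec_coord_conv; infer_instance

-- ===== CLAIM (what is proved, stated in full; the proofs are below) =====
def Claim_equal_coord_conv : Prop := ∀ (number : Int), Dom_coord_conv number → Spec_coord_conv number (coord_conv number)

-- ===== LEMMAS AND PROOFS =====

-- the little-endian digit list of length j, via the index formula (ediv/emod)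
def digitsF (j : Nat) (n : Int) : List Int :=
  (List.range j).map (fun i => n / 60 ^ i % 60)

theorem digitsF_zero (j : Nat) : digitsF j 0 = List.replicate j 0 := by
  unfold digitsF
  simp [List.map_const']

theorem digitsF_succ (j : Nat) (n : Int) :
    digitsF (j + 1) n = n % 60 :: digitsF j (n / 60) := by
  unfold digitsF
  rw [List.range_succ_eq_map]
  simp only [List.map_cons, List.map_map]
  congr 1
  · norm_num
  · apply List.map_congr_left
    intro i _
    simp only [Function.comp]
    rw [pow_succ', ← Int.ediv_ediv_of_nonneg (by norm_num)]

theorem coordPadA_eq (d : List Int) :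
    coordPadA d = d ++ List.replicate (6 - d.length) 0 := by
  by_cases h : d.length < 6
  · rw [coordPadA, if_pos h, coordPadA_eq (d ++ [0])]
    rw [List.append_assoc]
    congr 1
    simp
    rw [show 6 - d.length = (5 - d.length) + 1 from by omega, List.replicate_succ]
  · rw [coordPadA, if_neg h]
    simp [show 6 - d.length = 0 by omega]
termination_by 6 - d.length
decreasing_by simp; omega

theorem coordLoopA_pad (j : Nat) (n : Int) (acc : List Int)
    (h0 : 0 ≤ n) (hlt : n < 60 ^ j) :
    coordLoopA n acc ++ List.replicate (acc.length + j - (coordLoopA n acc).length) 0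
      = acc ++ digitsF j n := by
  induction j generalizing n acc with
  | zero =>
      have hn : n = 0 := by simp at hlt; omega
      subst hn
      rw [coordLoopA, dif_neg (by omega)]
      simp [digitsF]
  | succ k ih =>
      by_cases hp : 0 < n
      · rw [coordLoopA, dif_pos hp]
        have hfd : PySem.Int.floordiv n 60 = n / 60 :=
          PySem.Int.floordiv_eq_ediv_of_pos (by norm_num)
        have hmd : PySem.Int.mod n 60 = n % 60 :=
          PySem.Int.mod_eq_emod_of_pos (by norm_num)
        rw [hfd, hmd]
        have h0' : (0:Int) ≤ n / 60 := Int.ediv_nonneg h0 (by norm_num)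
        have hlt' : n / 60 < 60 ^ k := by
          rw [Int.ediv_lt_iff_lt_mul (by norm_num)]
          calc n < 60 ^ (k + 1) := hlt
            _ = 60 ^ k * 60 := by ring
        have := ih (n / 60) (acc ++ [n % 60]) h0' hlt'
        rw [show (acc ++ [n % 60]).length + k = acc.length + (k + 1) by simp; omega] at this
        rw [this, digitsF_succ]
        simp
      · have hn : n = 0 := by omega
        subst hn
        rw [coordLoopA, dif_neg (by omega)]
        rw [digitsF_zero]
        simp [show acc.length + (k + 1) - acc.length = k + 1 by omega]

theorem coord_conv_eq_digitsF (number : Int) :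
    coord_conv number = digitsF 6 (PySem.Int.mod number (60 ^ 6)) := by
  unfold coord_conv
  set m := PySem.Int.mod number (60 ^ 6) with hm
  have hmemod : m = number % 60 ^ 6 := PySem.Int.mod_eq_emod_of_pos (by positivity)
  have h0 : 0 ≤ m := by rw [hmemod]; exact Int.emod_nonneg _ (by positivity)
  have hlt : m < 60 ^ 6 := by
    rw [hmemod]; exact Int.emod_lt_of_pos _ (by positivity)
  have key := coordLoopA_pad 6 m [] h0 (by exact_mod_cast hlt)
  rw [coordPadA_eq]
  have hlen : (coordLoopA m []).length ≤ 6 := by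
    by_contra hgt
    have := congrArg List.length key
    simp [digitsF] at this
    omega
  simpa [show (List.nil (α := Int)).length + 6 = 6 from by simp,
    show (6 : Nat) - (coordLoopA m []).length
        = List.nil.length + 6 - (coordLoopA m []).length from by simp] using key

theorem coord_conv_alt_eq_digitsF (number : Int) :
    coord_conv_alt number = digitsF 6 (PySem.Int.mod number (60 ^ 6)) := by
  unfold coord_conv_alt digitsF
  apply List.map_congr_left
  intro i _
  rw [PySem.Int.floordiv_eq_ediv_of_pos (by positivity),
      PySem.Int.mod_eq_emod_of_pos (by norm_num)]

-- ===== VERDICT (by name: the statement is the Claim_ definition above) =====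
theorem coord_conv_spec : Claim_equal_coord_conv := by
  intro number _
  unfold Spec_coord_conv
  rw [coord_conv_eq_digitsF, coord_conv_alt_eq_digitsF]
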